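-- pv_equiv track=rewrite | github.com/prisms-center/CASMpython | casm/casm/misc/matrix.py | canonical_unroll_index_list_recursive
-- ===== SOURCE A (Python) =====
-- def canonical_unroll_index_list_recursive(n, origin, current_list):
--     """Recursive helper function for canonical_unroll_index_list"""
--     o_i, o_j = origin
--     for k_sw in range(n):
--         current_list.append((o_i + k_sw, o_j + k_sw))
--     for k_n in range(n - 1):
--         current_list.append((o_i + n - 2 - k_n, o_j + n - 1))
--     for k_w in range(n - 2):
--         current_list.append((o_i, o_j + n - 2 - k_w))
--     if n >= 3:
--         return canonical_unroll_index_list_recursive(n - 3, (o_i + 1, o_j + 2),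
--                                                      current_list)
--     else:
--         return current_list
-- ===== SOURCE B (Python) =====
-- def canonical_unroll_index_list_recursive(n, origin, current_list):
--     """Non-recursive: the ring parameters are a closed-form function of the
--     ring index t (size n-3t, origin shifted by (t, 2t)), so iterate t over a
--     precomputed ring count and extend with comprehensions."""
--     o_i, o_j = origin
--     for t in range(max(0, n // 3) + 1):
--         m, i, j = n - 3 * t, o_i + t, o_j + 2 * t
--         current_list += [(i + k, j + k) for k in range(m)]
--         current_list += [(i + m - 2 - k, j + m - 1) for k in range(m - 1)]
--         current_list += [(i, j + m - 2 - k) for k in range(m - 2)]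
--     return current_list
-- ===== Notes on version B (the rewrite author's own statement) =====
-- stated objective: alternative
-- what changed: Replaces tail recursion (three append-loops per call, then recurse with n-3 and a shifted origin) by a single bounded for-loop over a closed-form ring count max(0, n//3)+1, computing each ring's size and origin directly from the ring index and extending with list comprehensions.
import Mathlib
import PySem

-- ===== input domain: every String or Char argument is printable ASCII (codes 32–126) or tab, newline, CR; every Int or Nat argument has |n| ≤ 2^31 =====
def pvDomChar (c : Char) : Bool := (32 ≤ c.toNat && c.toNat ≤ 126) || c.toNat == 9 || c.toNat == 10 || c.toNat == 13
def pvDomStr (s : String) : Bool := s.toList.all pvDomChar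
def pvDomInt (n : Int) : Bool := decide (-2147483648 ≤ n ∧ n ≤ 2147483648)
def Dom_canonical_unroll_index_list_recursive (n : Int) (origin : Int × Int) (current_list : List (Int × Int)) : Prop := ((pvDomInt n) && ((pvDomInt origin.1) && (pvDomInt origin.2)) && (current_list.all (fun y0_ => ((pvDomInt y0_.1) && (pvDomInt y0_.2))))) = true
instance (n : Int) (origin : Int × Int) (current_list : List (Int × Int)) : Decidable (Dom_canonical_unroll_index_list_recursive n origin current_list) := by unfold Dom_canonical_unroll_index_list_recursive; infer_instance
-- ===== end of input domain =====

-- B replaces A's tail recursion by one bounded loop over a closed-form ring count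
-- (objective: alternative decomposition; same cost). Python A/B mutate current_list in
-- place identically; the equivalence proved here is about the returned value.

-- ===== PORT A =====
def canonical_unroll_index_list_recursive (n : Int) (origin : Int × Int) (current_list : List (Int × Int)) : List (Int × Int) :=
  let o_i := origin.1
  let o_j := origin.2
  let l1 := (PySem.List.pyRange 0 n 1).foldl
    (fun acc k_sw => acc ++ [(o_i + k_sw, o_j + k_sw)]) current_list
  let l2 := (PySem.List.pyRange 0 (n - 1) 1).foldl
    (fun acc k_n => acc ++ [(o_i + n - 2 - k_n, o_j + n - 1)]) l1
  let l3 := (PySem.List.pyRange 0 (n - 2) 1).foldl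
    (fun acc k_w => acc ++ [(o_i, o_j + n - 2 - k_w)]) l2
  if 3 ≤ n then
    canonical_unroll_index_list_recursive (n - 3) (o_i + 1, o_j + 2) l3
  else
    l3
termination_by n.toNat
decreasing_by omega

-- ===== PORT B =====
def canonical_unroll_index_list_recursive_alt (n : Int) (origin : Int × Int) (current_list : List (Int × Int)) : List (Int × Int) :=
  let o_i := origin.1
  let o_j := origin.2
  (PySem.List.pyRange 0 (max 0 (PySem.Int.floordiv n 3) + 1) 1).foldl
    (fun acc t =>
      let m := n - 3 * t
      let i := o_i + t
      let j := o_j + 2 * t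
      ((acc ++ (PySem.List.pyRange 0 m 1).map (fun k => (i + k, j + k)))
        ++ (PySem.List.pyRange 0 (m - 1) 1).map (fun k => (i + m - 2 - k, j + m - 1)))
        ++ (PySem.List.pyRange 0 (m - 2) 1).map (fun k => (i, j + m - 2 - k)))
    current_list

-- ===== PRECONDITION & SPEC =====
def Spec_canonical_unroll_index_list_recursive (n : Int) (origin : Int × Int) (current_list : List (Int × Int)) (out : List (Int × Int)) : Prop := out = canonical_unroll_index_list_recursive_alt n origin current_list
instance (n : Int) (origin : Int × Int) (current_list : List (Int × Int)) (out : List (Int × Int)) : Decidable (Spec_canonical_unroll_index_list_recursive n origin current_list out) := by unfold Spec_canonical_unroll_index_list_recursive; infer_instance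

-- ===== CLAIM (what is proved, stated in full; the proofs are below) =====
def Claim_equal_canonical_unroll_index_list_recursive : Prop := ∀ (n : Int) (origin : Int × Int) (current_list : List (Int × Int)), Dom_canonical_unroll_index_list_recursive n origin current_list → Spec_canonical_unroll_index_list_recursive n origin current_list (canonical_unroll_index_list_recursive n origin current_list)

-- ===== LEMMAS AND PROOFS =====

-- one ring: the three segments appended for parameters (m, (i, j))
def pvRing (m i j : Int) : List (Int × Int) :=
  (PySem.List.pyRange 0 m 1).map (fun k => (i + k, j + k))
  ++ (PySem.List.pyRange 0 (m - 1) 1).map (fun k => (i + m - 2 - k, j + m - 1))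
  ++ (PySem.List.pyRange 0 (m - 2) 1).map (fun k => (i, j + m - 2 - k))

-- shift a unit-step fold from [1, T+1) down to [0, T)
theorem pv_foldl_shift {α : Type} (g : α → Int → α) (T : Int) (init : α) :
    (PySem.List.pyRange 1 (T + 1) 1).foldl g init
      = (PySem.List.pyRange 0 T 1).foldl (fun acc t => g acc (t + 1)) init := by
  rw [PySem.List.pyRange_one, PySem.List.pyRange_one]
  have h : (T + 1 - 1).toNat = (T - 0).toNat := by omega
  rw [h, List.foldl_map, List.foldl_map]
  apply PySem.List.foldl_congr_mem
  intro acc k _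
  have e : (1 : Int) + (k : Int) = 0 + (k : Int) + 1 := by ring
  rw [e]

theorem alt_eq_ring_step (n : Int) (origin : Int × Int) (cl : List (Int × Int)) :
    canonical_unroll_index_list_recursive_alt n origin cl
      = (if 3 ≤ n then
          canonical_unroll_index_list_recursive_alt (n - 3) (origin.1 + 1, origin.2 + 2)
            (cl ++ pvRing n origin.1 origin.2)
        else cl ++ pvRing n origin.1 origin.2) := by
  have hf : PySem.Int.floordiv n 3 = n / 3 :=
    PySem.Int.floordiv_eq_ediv_of_pos (by omega)
  have hf3 : PySem.Int.floordiv (n - 3) 3 = (n - 3) / 3 :=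
    PySem.Int.floordiv_eq_ediv_of_pos (by omega)
  by_cases h3 : 3 ≤ n
  · have hT : max 0 (PySem.Int.floordiv n 3) + 1
        = (max 0 (PySem.Int.floordiv (n - 3) 3) + 1) + 1 := by
      rw [hf, hf3]; omega
    simp only [canonical_unroll_index_list_recursive_alt, if_pos h3]
    rw [hT, PySem.List.pyRange_one_cons (by rw [hf3]; omega)]
    simp only [List.foldl_cons, zero_add]
    rw [pv_foldl_shift]
    have hinit :
        ((cl ++ (PySem.List.pyRange 0 (n - 3 * 0) 1).map
            (fun k => (origin.1 + 0 + k, origin.2 + 2 * 0 + k)))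
          ++ (PySem.List.pyRange 0 (n - 3 * 0 - 1) 1).map
            (fun k => (origin.1 + 0 + (n - 3 * 0) - 2 - k, origin.2 + 2 * 0 + (n - 3 * 0) - 1)))
          ++ (PySem.List.pyRange 0 (n - 3 * 0 - 2) 1).map
            (fun k => (origin.1 + 0, origin.2 + 2 * 0 + (n - 3 * 0) - 2 - k))
        = cl ++ pvRing n origin.1 origin.2 := by
      simp [pvRing, List.append_assoc]
    rw [hinit]
    apply PySem.List.foldl_congr_mem
    intro acc t _
    have e1 : n - 3 * (t + 1) = n - 3 - 3 * t := by ring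
    have e2 : origin.1 + (t + 1) = origin.1 + 1 + t := by ring
    have e3 : origin.2 + 2 * (t + 1) = origin.2 + 2 + 2 * t := by ring
    rw [e1, e2, e3]
  · have hT : max 0 (PySem.Int.floordiv n 3) + 1 = 1 := by rw [hf]; omega
    simp only [canonical_unroll_index_list_recursive_alt, if_neg h3]
    rw [hT]
    have hr : PySem.List.pyRange 0 1 1 = [0] := by decide
    rw [hr]
    simp [pvRing, List.append_assoc]

theorem pv_A_eq_alt (n : Int) (origin : Int × Int) (cl : List (Int × Int)) :
    canonical_unroll_index_list_recursive n origin cl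
      = canonical_unroll_index_list_recursive_alt n origin cl := by
  rw [canonical_unroll_index_list_recursive]
  simp only [PySem.List.foldl_append_singleton_eq_map]
  rw [alt_eq_ring_step]
  by_cases h3 : 3 ≤ n
  · rw [if_pos h3, if_pos h3, pv_A_eq_alt]
    congr 1
    simp [pvRing, List.append_assoc]
  · rw [if_neg h3, if_neg h3]
    simp [pvRing, List.append_assoc]
termination_by n.toNat
decreasing_by omega

-- ===== VERDICT (by name: the statement is the Claim_ definition above) =====
theorem canonical_unroll_index_list_recursive_spec : Claim_equal_canonical_unroll_index_list_recursive := by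
  intro n origin cl _
  exact pv_A_eq_alt n origin cl
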